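-- pv_equiv track=rewrite | github.com/ashutosh4398/net_practice | fiji.py | find_respective_greenest_gardens
-- ===== SOURCE A (Python) =====
-- def find_first_and_second_max(array):
--     if len(array) < 2:
--         return (-1, -1)
--     # initial indices of first and second max
--     first_max = 0 if array[0] > array[1] else 1
--     second_max = 0 if array[0] < array[1] else 1
--
--     for idx in range(2, len(array)):
--         if array[idx] > array[first_max]:
--             second_max = first_max
--             first_max = idx
--         elif array[idx] > array[second_max]:
--             second_max = idx
--
--     return first_max, second_max
--
-- def find_respective_greenest_gardens(gardens):
--     greenest_garden_idx, second_greenest_idx = find_first_and_second_max(gardens)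
--     if greenest_garden_idx == -1:
--         return garden
--     greenest_garden = gardens[greenest_garden_idx]
--     second_greenest = gardens[second_greenest_idx]
--
--     for idx, garden in enumerate(gardens):
--         if garden == greenest_garden:
--             gardens[idx] = second_greenest
--             continue
--         gardens[idx] = greenest_garden
--
--     return gardens
-- ===== SOURCE B (Python) =====
-- def find_respective_greenest_gardens(gardens):
--     greenest, second = sorted(gardens, reverse=True)[:2]
--     for idx, g in enumerate(gardens):
--         gardens[idx] = second if g == greenest else greenest
--     return gardens
-- ===== Notes on version B (the rewrite author's own statement) =====
-- stated objective: idiomatic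
-- what changed: The hand-written two-index linear scan for the top-two values is replaced by taking the first two elements of sorted(gardens, reverse=True); the rewrite loop stays an in-place enumerate loop.
import Mathlib
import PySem

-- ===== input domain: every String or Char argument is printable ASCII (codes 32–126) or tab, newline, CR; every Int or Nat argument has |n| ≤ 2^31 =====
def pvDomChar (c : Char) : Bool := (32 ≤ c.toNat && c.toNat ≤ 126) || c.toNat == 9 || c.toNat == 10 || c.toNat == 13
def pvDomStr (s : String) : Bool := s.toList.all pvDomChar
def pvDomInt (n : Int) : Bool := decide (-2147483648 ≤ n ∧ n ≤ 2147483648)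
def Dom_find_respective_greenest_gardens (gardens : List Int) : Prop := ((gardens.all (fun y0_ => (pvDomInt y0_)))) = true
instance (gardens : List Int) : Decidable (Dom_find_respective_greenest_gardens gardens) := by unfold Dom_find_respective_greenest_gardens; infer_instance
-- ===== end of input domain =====

-- B replaces A's manual two-index top-two scan with taking the first two elements of the
-- descending sort (more idiomatic). Both A and B mutate the list in place in Python; the
-- equivalence proved here is about the RETURN value.


-- ===== PORT A =====
def find_first_and_second_max (array : List Int) : Int × Int :=
  if array.length < 2 then (-1, -1)
  else
    let first_max : Int := if PySem.List.pyGetD array 0 0 > PySem.List.pyGetD array 1 0 then 0 else 1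
    let second_max : Int := if PySem.List.pyGetD array 0 0 < PySem.List.pyGetD array 1 0 then 0 else 1
    (PySem.List.pyRange 2 array.length 1).foldl
      (fun (p : Int × Int) idx =>
        if PySem.List.pyGetD array idx 0 > PySem.List.pyGetD array p.1 0 then (idx, p.1)
        else if PySem.List.pyGetD array idx 0 > PySem.List.pyGetD array p.2 0 then (p.1, idx)
        else p)
      (first_max, second_max)

def find_respective_greenest_gardens (gardens : List Int) : List Int :=
  let p := find_first_and_second_max gardens
  if p.1 = -1 then []   -- Python raises NameError here ('garden' undefined); excluded by Pre_
  else
    let greenest_garden := PySem.List.pyGetD gardens p.1 0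
    let second_greenest := PySem.List.pyGetD gardens p.2 0
    gardens.map (fun garden => if garden = greenest_garden then second_greenest else greenest_garden)

-- ===== PORT B =====
def find_respective_greenest_gardens_alt (gardens : List Int) : List Int :=
  match PySem.List.slice (PySem.List.sorted gardens (fun x => x) true) none (some 2) with
  | [greenest, second] => gardens.map (fun g => if g = greenest then second else greenest)
  | _ => []   -- Python raises ValueError here (unpacking ≠ 2 values); excluded by Pre_

-- ===== PRECONDITION & SPEC =====
-- Pre_ excludes lists of fewer than two elements: there A raises NameError ('garden' is
-- undefined) and B raises ValueError (unpacking fewer than two values).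
def Pre_find_respective_greenest_gardens (gardens : List Int) : Prop := 2 ≤ gardens.length
instance (gardens : List Int) : Decidable (Pre_find_respective_greenest_gardens gardens) := by unfold Pre_find_respective_greenest_gardens; infer_instance
def pvWitness_find_respective_greenest_gardens : List Int := [3, 1, 4]

def Spec_find_respective_greenest_gardens (gardens : List Int) (out : List Int) : Prop := out = find_respective_greenest_gardens_alt gardens
instance (gardens : List Int) (out : List Int) : Decidable (Spec_find_respective_greenest_gardens gardens out) := by unfold Spec_find_respective_greenest_gardens; infer_instance

-- ===== CLAIM (what is proved, stated in full; the proofs are below) =====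
def Claim_equal_find_respective_greenest_gardens : Prop := ∀ (gardens : List Int), Dom_find_respective_greenest_gardens gardens → Pre_find_respective_greenest_gardens gardens → Spec_find_respective_greenest_gardens gardens (find_respective_greenest_gardens gardens)

-- ===== LEMMAS AND PROOFS =====

-- "(a, b) is the top-two value pair of L": descending, and some permutation of L starts
-- with a, b followed by elements all ≤ b.
def Top2 (L : List Int) (a b : Int) : Prop :=
  b ≤ a ∧ ∃ rest, (a :: b :: rest).Perm L ∧ ∀ x ∈ rest, x ≤ b

theorem Top2_perm {L L' : List Int} {a b : Int} (hp : L.Perm L') (h : Top2 L a b) :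
    Top2 L' a b := by
  obtain ⟨hba, rest, hperm, hle⟩ := h
  exact ⟨hba, rest, hperm.trans hp, hle⟩

theorem Top2_unique {L : List Int} {a b a' b' : Int}
    (h : Top2 L a b) (h' : Top2 L a' b') : a = a' ∧ b = b' := by
  obtain ⟨hba, rest, hperm, hle⟩ := h
  obtain ⟨hba', rest', hperm', hle'⟩ := h'
  have hp : (a :: b :: rest).Perm (a' :: b' :: rest') := hperm.trans hperm'.symm
  have haa' : a = a' := by
    have h1 : a ∈ (a' :: b' :: rest') := hp.mem_iff.mp (by simp)
    have h2 : a' ∈ (a :: b :: rest) := hp.symm.mem_iff.mp (by simp)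
    simp only [List.mem_cons] at h1 h2
    have h1' : a ≤ a' := by
      rcases h1 with rfl | rfl | h1
      · exact le_refl _
      · exact hba'
      · exact (hle' _ h1).trans hba'
    have h2' : a' ≤ a := by
      rcases h2 with rfl | rfl | h2
      · exact le_refl _
      · exact hba
      · exact (hle _ h2).trans hba
    omega
  subst haa'
  have hp2 : (b :: rest).Perm (b' :: rest') := hp.cons_inv
  have hb1 : b ≤ b' := by
    have hb : b ∈ (b' :: rest') := hp2.mem_iff.mp (by simp)
    simp only [List.mem_cons] at hb
    rcases hb with rfl | hb
    · exact le_refl _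
    · exact hle' _ hb
  have hb2 : b' ≤ b := by
    have hb : b' ∈ (b :: rest) := hp2.symm.mem_iff.mp (by simp)
    simp only [List.mem_cons] at hb
    rcases hb with rfl | hb
    · exact le_refl _
    · exact hle _ hb
  exact ⟨rfl, by omega⟩

-- the pure value-level top-two scan that A's index scan computes
def top2 (a b : Int) : List Int → Int × Int
  | [] => (a, b)
  | x :: r => if x > a then top2 x a r else if x > b then top2 a x r else top2 a b r

theorem top2_spec (l : List Int) : ∀ a b : Int, b ≤ a →
    b ≤ (top2 a b l).2 ∧ Top2 (a :: b :: l) (top2 a b l).1 (top2 a b l).2 := by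
  induction l with
  | nil =>
    intro a b hba
    exact ⟨le_refl b, hba, [], List.Perm.refl _, by simp⟩
  | cons x r ih =>
    intro a b hba
    show b ≤ (top2 a b (x :: r)).2 ∧ Top2 (a :: b :: x :: r) (top2 a b (x :: r)).1 (top2 a b (x :: r)).2
    simp only [top2]
    split_ifs with h1 h2
    · -- x > a : recurse on (x, a)
      obtain ⟨hmono, hba2, rest, hperm, hle⟩ := ih x a (by omega)
      refine ⟨by omega, hba2, b :: rest, ?_, ?_⟩
      · have s1 : ((top2 x a r).1 :: (top2 x a r).2 :: b :: rest).Perm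
            (b :: (top2 x a r).1 :: (top2 x a r).2 :: rest) :=
          ((List.Perm.swap b (top2 x a r).2 rest).cons _).trans
            (List.Perm.swap b (top2 x a r).1 _)
        have s3 : (b :: x :: a :: r).Perm (a :: b :: x :: r) :=
          ((List.Perm.swap a x r).cons b).trans (List.Perm.swap a b (x :: r))
        exact s1.trans ((hperm.cons b).trans s3)
      · intro y hy
        simp only [List.mem_cons] at hy
        rcases hy with rfl | hy
        · omega
        · exact hle _ hy
    · -- x ≤ a, x > b : recurse on (a, x)
      obtain ⟨hmono, hba2, rest, hperm, hle⟩ := ih a x (by omega)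
      refine ⟨by omega, hba2, b :: rest, ?_, ?_⟩
      · have s1 : ((top2 a x r).1 :: (top2 a x r).2 :: b :: rest).Perm
            (b :: (top2 a x r).1 :: (top2 a x r).2 :: rest) :=
          ((List.Perm.swap b (top2 a x r).2 rest).cons _).trans
            (List.Perm.swap b (top2 a x r).1 _)
        exact s1.trans ((hperm.cons b).trans (List.Perm.swap a b (x :: r)))
      · intro y hy
        simp only [List.mem_cons] at hy
        rcases hy with rfl | hy
        · omega
        · exact hle _ hy
    · -- x ≤ b : drop x
      obtain ⟨hmono, hba2, rest, hperm, hle⟩ := ih a b hba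
      refine ⟨hmono, hba2, x :: rest, ?_, ?_⟩
      · have s1 : ((top2 a b r).1 :: (top2 a b r).2 :: x :: rest).Perm
            (x :: (top2 a b r).1 :: (top2 a b r).2 :: rest) :=
          ((List.Perm.swap x (top2 a b r).2 rest).cons _).trans
            (List.Perm.swap x (top2 a b r).1 _)
        have s3 : (x :: a :: b :: r).Perm (a :: b :: x :: r) :=
          (List.Perm.swap a x (b :: r)).trans ((List.Perm.swap b x r).cons a)
        exact s1.trans ((hperm.cons x).trans s3)
      · intro y hy
        simp only [List.mem_cons] at hy
        rcases hy with rfl | hy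
        · omega
        · exact hle _ hy

-- A's index scan over range(k, len) computes top2 on the values of the dropped suffix
theorem scan (array : List Int) :
    ∀ (m k fm sm : Nat), array.length - k = m → fm < array.length → sm < array.length →
    ∃ (fi si : Nat),
      (PySem.List.pyRange (k : Int) (array.length : Int) 1).foldl
        (fun (p : Int × Int) idx =>
          if PySem.List.pyGetD array idx 0 > PySem.List.pyGetD array p.1 0 then (idx, p.1)
          else if PySem.List.pyGetD array idx 0 > PySem.List.pyGetD array p.2 0 then (p.1, idx)
          else p) ((fm : Int), (sm : Int)) = ((fi : Int), (si : Int))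
      ∧ fi < array.length ∧ si < array.length
      ∧ (array.getD fi 0, array.getD si 0)
          = top2 (array.getD fm 0) (array.getD sm 0) (array.drop k) := by
  intro m
  induction m with
  | zero =>
    intro k fm sm hm hfm hsm
    have hk : array.length ≤ k := by omega
    rw [PySem.List.pyRange_one_eq_nil (by exact_mod_cast hk), List.drop_eq_nil_of_le hk]
    exact ⟨fm, sm, rfl, hfm, hsm, rfl⟩
  | succ m ih =>
    intro k fm sm hm hfm hsm
    have hk : k < array.length := by omega
    rw [PySem.List.pyRange_one_cons (by exact_mod_cast hk), List.foldl_cons]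
    have hcast : ((k : Int) + 1) = ((k + 1 : Nat) : Int) := by push_cast; ring
    rw [List.drop_eq_getElem_cons hk]
    simp only [PySem.List.pyGetD_natCast, top2]
    rw [List.getD_eq_getElem array 0 hk, List.getD_eq_getElem array 0 hfm,
        List.getD_eq_getElem array 0 hsm]
    split_ifs with h1 h2
    · obtain ⟨fi, si, heq, hfi, hsi, hval⟩ := ih (k + 1) k fm (by omega) hk hfm
      refine ⟨fi, si, ?_, hfi, hsi, ?_⟩
      · rw [hcast]; exact heq
      · rw [hval, List.getD_eq_getElem array 0 hk, List.getD_eq_getElem array 0 hfm]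
    · obtain ⟨fi, si, heq, hfi, hsi, hval⟩ := ih (k + 1) fm k (by omega) hfm hk
      refine ⟨fi, si, ?_, hfi, hsi, ?_⟩
      · rw [hcast]; exact heq
      · rw [hval, List.getD_eq_getElem array 0 hfm, List.getD_eq_getElem array 0 hk]
    · obtain ⟨fi, si, heq, hfi, hsi, hval⟩ := ih (k + 1) fm sm (by omega) hfm hsm
      refine ⟨fi, si, ?_, hfi, hsi, ?_⟩
      · rw [hcast]; exact heq
      · rw [hval, List.getD_eq_getElem array 0 hfm, List.getD_eq_getElem array 0 hsm]

-- A returns the rewrite map for some top-two pair of the input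
theorem A_char (x y : Int) (t : List Int) :
    ∃ p1 p2 : Int, Top2 (x :: y :: t) p1 p2 ∧
      find_respective_greenest_gardens (x :: y :: t)
        = (x :: y :: t).map (fun g => if g = p1 then p2 else p1) := by
  have h0 : PySem.List.pyGetD (x :: y :: t) (0 : Int) 0 = x :=
    PySem.List.pyGetD_zero_cons x (y :: t) 0
  have h1 : PySem.List.pyGetD (x :: y :: t) (1 : Int) 0 = y := by
    have hc : (1 : Int) = ((1 : Nat) : Int) := by norm_num
    rw [hc, PySem.List.pyGetD_natCast]
    simp
  obtain ⟨fi, si, heq, hfi, hsi, hval⟩ :=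
    scan (x :: y :: t) ((x :: y :: t).length - 2) 2
      (if x > y then 0 else 1) (if x < y then 0 else 1) rfl
      (by split_ifs <;> simp)
      (by split_ifs <;> simp)
  refine ⟨(x :: y :: t).getD fi 0, (x :: y :: t).getD si 0, ?_, ?_⟩
  · -- Top2
    have hdrop : (x :: y :: t).drop 2 = t := rfl
    rw [hdrop] at hval
    have ha : (x :: y :: t).getD (if x > y then 0 else 1) 0 = if x > y then x else y := by
      split_ifs <;> rfl
    have hb : (x :: y :: t).getD (if x < y then 0 else 1) 0 = if x < y then x else y := by
      split_ifs <;> rfl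
    rw [ha, hb] at hval
    have hba : (if x < y then x else y) ≤ (if x > y then x else y) := by
      split_ifs <;> omega
    have htop := (top2_spec t _ _ hba).2
    have hp1 : (x :: y :: t).getD fi 0 = (top2 (if x > y then x else y) (if x < y then x else y) t).1 := by
      rw [← hval]
    have hp2 : (x :: y :: t).getD si 0 = (top2 (if x > y then x else y) (if x < y then x else y) t).2 := by
      rw [← hval]
    rw [hp1, hp2]
    refine Top2_perm ?_ htop
    rcases lt_trichotomy x y with h | h | h
    · rw [if_neg (show ¬ x > y by omega), if_pos h]
      exact List.Perm.swap x y t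
    · subst h
      simp
    · rw [if_pos h, if_neg (show ¬ x < y by omega)]
  · -- the returned list
    have hc2 : (2 : Int) = ((2 : Nat) : Int) := by norm_num
    have hi1 : (if PySem.List.pyGetD (x :: y :: t) 0 0 > PySem.List.pyGetD (x :: y :: t) 1 0 then (0 : Int) else 1)
        = ((if x > y then 0 else 1 : Nat) : Int) := by
      rw [h0, h1]; split_ifs <;> rfl
    have hi2 : (if PySem.List.pyGetD (x :: y :: t) 0 0 < PySem.List.pyGetD (x :: y :: t) 1 0 then (0 : Int) else 1)
        = ((if x < y then 0 else 1 : Nat) : Int) := by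
      rw [h0, h1]; split_ifs <;> rfl
    have hffsm : find_first_and_second_max (x :: y :: t) = ((fi : Int), (si : Int)) := by
      unfold find_first_and_second_max
      rw [if_neg (by simp)]
      rw [hi1, hi2, hc2]
      exact heq
    simp only [find_respective_greenest_gardens]
    rw [hffsm]
    rw [show (((fi : Int), (si : Int))).1 = (fi : Int) from rfl,
        show (((fi : Int), (si : Int))).2 = (si : Int) from rfl]
    rw [if_neg (show ((fi : Int)) ≠ -1 by omega)]
    simp only [PySem.List.pyGetD_natCast]

-- B returns the rewrite map for some top-two pair of the input
theorem B_char (x y : Int) (t : List Int) :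
    ∃ q1 q2 : Int, Top2 (x :: y :: t) q1 q2 ∧
      find_respective_greenest_gardens_alt (x :: y :: t)
        = (x :: y :: t).map (fun g => if g = q1 then q2 else q1) := by
  have hlen : (PySem.List.sorted (x :: y :: t) (fun v => v) true).length = t.length + 2 := by
    rw [PySem.List.length_sorted]; simp
  rcases hs : PySem.List.sorted (x :: y :: t) (fun v => v) true with _ | ⟨q1, l2⟩
  · rw [hs] at hlen; simp at hlen
  rcases l2 with _ | ⟨q2, rs⟩
  · rw [hs] at hlen; simp at hlen
  have hslice : PySem.List.slice (q1 :: q2 :: rs) none (some 2) = [q1, q2] := by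
    have h2 : (2 : Int) = ((2 : Nat) : Int) := rfl
    rw [h2, PySem.List.slice_to_natCast]
    rfl
  have hpw := PySem.List.sorted_pairwise_rev (xs := x :: y :: t) (key := fun v => v)
  rw [hs] at hpw
  simp only [List.pairwise_cons] at hpw
  have hperm := PySem.List.sorted_perm (xs := x :: y :: t) (key := fun v => v) (rev := true)
  rw [hs] at hperm
  refine ⟨q1, q2, ⟨hpw.1 q2 (by simp), rs, hperm, fun z hz => hpw.2.1 z hz⟩, ?_⟩
  unfold find_respective_greenest_gardens_alt
  rw [hs, hslice]

-- ===== VERDICT (by name: the statement is the Claim_ definition above) =====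
theorem find_respective_greenest_gardens_spec : Claim_equal_find_respective_greenest_gardens := by
  intro gardens _hdom hpre
  unfold Spec_find_respective_greenest_gardens
  unfold Pre_find_respective_greenest_gardens at hpre
  rcases gardens with _ | ⟨x, _ | ⟨y, t⟩⟩
  · simp at hpre
  · simp at hpre
  obtain ⟨p1, p2, htopA, hA⟩ := A_char x y t
  obtain ⟨q1, q2, htopB, hB⟩ := B_char x y t
  obtain ⟨e1, e2⟩ := Top2_unique htopA htopB
  rw [hA, hB, e1, e2]
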